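-- pv_equiv track=rewrite | github.com/luffy2106/bigO_coding | Lecture2_AlgorithmicComplexity/Array.py | get_min_first_k
-- ===== SOURCE A (Python) =====
-- def get_min_first_k(first_k, first_k_index, K):
--     stack = []
--     stack_index = []
--     nb_distinc = 0
--     first_k_reverse = first_k[::-1]
--     first_k_index_reverse = first_k_index[::-1]
--     for i in range(0, len(first_k_reverse)):
--         if nb_distinc == K:
--             break
--         if len(stack) == 0:
--             stack.append(first_k_reverse[i])
--             stack_index.append(first_k_index_reverse[i])
--             nb_distinc+=1
--         else:
--             if first_k_reverse[i] not in stack: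
--                 nb_distinc+=1
--             stack.append(first_k_reverse[i])
--             stack_index.append(first_k_index_reverse[i])
--
--
--     stack  = stack[::-1]
--     stack_index  = stack_index[::-1]
--     stack_index = [i+1 for i in stack_index]
--     return stack, stack_index
-- ===== SOURCE B (Python) =====
-- def get_min_first_k(first_k, first_k_index, K):
--     # Record each value's last occurrence position in one forward pass, then the
--     # cut point is the K-th largest last-occurrence position; slice both lists.
--     last = {}
--     for i, v in enumerate(first_k):
--         last[v] = i
--     if K == 0:
--         cut = len(first_k)
--     elif 0 < K <= len(last):
--         cut = sorted(last.values())[len(last) - K]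
--     else:
--         cut = 0
--     m = len(first_k) - cut
--     stack = first_k[cut:]
--     stack_index = [i + 1 for i in first_k_index[len(first_k_index) - m:]]
--     return stack, stack_index
-- ===== Notes on version B (the rewrite author's own statement) =====
-- stated objective: alternative
-- what changed: B replaces A's backward scan with a stack and repeated membership tests by a forward pass building a last-occurrence dictionary, then sorts the last-occurrence positions and picks the K-th largest as the cut point, producing both outputs by slicing.
import Mathlib
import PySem

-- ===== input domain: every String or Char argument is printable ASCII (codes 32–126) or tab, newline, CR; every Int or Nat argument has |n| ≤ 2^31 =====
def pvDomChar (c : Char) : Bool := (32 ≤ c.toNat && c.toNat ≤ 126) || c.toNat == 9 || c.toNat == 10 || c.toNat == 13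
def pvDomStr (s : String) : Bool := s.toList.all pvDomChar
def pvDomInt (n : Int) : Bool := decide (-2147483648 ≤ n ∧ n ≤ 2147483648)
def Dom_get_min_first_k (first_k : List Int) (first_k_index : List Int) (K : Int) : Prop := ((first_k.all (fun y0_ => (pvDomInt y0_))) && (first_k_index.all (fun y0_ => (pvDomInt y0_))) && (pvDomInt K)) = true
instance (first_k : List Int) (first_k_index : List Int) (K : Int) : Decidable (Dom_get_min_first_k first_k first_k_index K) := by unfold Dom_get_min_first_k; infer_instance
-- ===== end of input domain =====

-- B replaces A's backward membership-scan by a forward last-occurrence dictionary pass plus a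
-- sort of the last-occurrence positions (objective: alternative; return value only).


-- ===== PORT A =====
-- the for-loop over range(0, len(first_k_reverse)) with the break at its head
def aLoop (fkr fkir : List Int) (K : Int) : List Int → List Int → List Int → Int → List Int × List Int
  | [], stack, stacki, _ => (stack, stacki)
  | i :: rest, stack, stacki, nb =>
    if nb = K then (stack, stacki)
    else if stack.length = 0 then
      aLoop fkr fkir K rest (stack ++ [PySem.List.pyGetD fkr i 0]) (stacki ++ [PySem.List.pyGetD fkir i 0]) (nb + 1)
    else
      aLoop fkr fkir K rest (stack ++ [PySem.List.pyGetD fkr i 0]) (stacki ++ [PySem.List.pyGetD fkir i 0])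
        (if PySem.List.pyGetD fkr i 0 ∉ stack then nb + 1 else nb)

def get_min_first_k (first_k : List Int) (first_k_index : List Int) (K : Int) : List Int × List Int :=
  let first_k_reverse := (PySem.List.slice? first_k none none (-1)).getD []
  let first_k_index_reverse := (PySem.List.slice? first_k_index none none (-1)).getD []
  let res := aLoop first_k_reverse first_k_index_reverse K
      (PySem.List.pyRange 0 (first_k_reverse.length : Int) 1) [] [] 0
  let stack := (PySem.List.slice? res.1 none none (-1)).getD []
  let stack_index := (PySem.List.slice? res.2 none none (-1)).getD []
  (stack, stack_index.map (· + 1))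

-- ===== PORT B =====
-- forward pass: last occurrence index of every value ('for i, v in enumerate(first_k): last[v] = i')
def bLast (first_k : List Int) : PySem.Dict Int Int :=
  (PySem.List.enumerate first_k 0).foldl (fun d p => d.insert p.2 p.1) PySem.Dict.empty

def get_min_first_k_alt (first_k : List Int) (first_k_index : List Int) (K : Int) : List Int × List Int :=
  let last := bLast first_k
  let cut : Int :=
    if K = 0 then (first_k.length : Int)
    else if 0 < K ∧ K ≤ (last.size : Int) then
      -- sorted(last.values())[len(last) - K]; the guard puts the index in range, so pyGetD is exact
      PySem.List.pyGetD (PySem.List.sorted last.values (fun x => x) false) ((last.size : Int) - K) 0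
    else 0
  let m : Int := (first_k.length : Int) - cut
  let stack := PySem.List.slice first_k (some cut) none
  let stack_index := (PySem.List.slice first_k_index (some ((first_k_index.length : Int) - m)) none).map (· + 1)
  (stack, stack_index)

-- ===== PRECONDITION & SPEC =====
-- Pre_ excludes exactly the inputs on which A raises IndexError: first_k_index shorter than
-- first_k while the backward scan does not reach K distinct values within its length.
def Pre_get_min_first_k (first_k : List Int) (first_k_index : List Int) (K : Int) : Prop :=
  first_k.length ≤ first_k_index.length ∨
    (0 ≤ K ∧ K ≤ ((PySem.Set.ofList (first_k.reverse.take first_k_index.length)).length : Int))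
instance (first_k : List Int) (first_k_index : List Int) (K : Int) : Decidable (Pre_get_min_first_k first_k first_k_index K) := by unfold Pre_get_min_first_k; infer_instance
def pvWitness_get_min_first_k : List Int × List Int × Int := ([1, 2, 1], [3, 4, 5], 2)

def Spec_get_min_first_k (first_k : List Int) (first_k_index : List Int) (K : Int) (out : List Int × List Int) : Prop := out = get_min_first_k_alt first_k first_k_index K
instance (first_k : List Int) (first_k_index : List Int) (K : Int) (out : List Int × List Int) : Decidable (Spec_get_min_first_k first_k first_k_index K out) := by unfold Spec_get_min_first_k; infer_instance

-- ===== CLAIM (what is proved, stated in full; the proofs are below) =====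
def Claim_equal_get_min_first_k : Prop := ∀ (first_k : List Int) (first_k_index : List Int) (K : Int), Dom_get_min_first_k first_k first_k_index K → Pre_get_min_first_k first_k first_k_index K → Spec_get_min_first_k first_k first_k_index K (get_min_first_k first_k first_k_index K)

-- ===== LEMMAS AND PROOFS =====

-- proof-side characterisation of A's loop: number of trailing elements consumed
def bCount (K : Int) : List Int → PySem.Set Int → Nat
  | [], _ => 0
  | v :: rest, seen =>
    if (PySem.Set.len seen) = K then 0
    else 1 + bCount K rest (PySem.Set.add seen v)

theorem bCount_le_length (K : Int) (l : List Int) (seen : PySem.Set Int) :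
    bCount K l seen ≤ l.length := by
  induction l generalizing seen with
  | nil => simp [bCount]
  | cons v rest ih =>
    simp only [bCount, List.length_cons]
    split
    · omega
    · have := ih (PySem.Set.add seen v); omega

theorem length_add (s : PySem.Set Int) (v : Int) :
    (PySem.Set.add s v).length = if v ∈ s then s.length else s.length + 1 := by
  by_cases h : v ∈ s
  · simp [PySem.Set.add, PySem.Set.contains, h]
  · simp [PySem.Set.add, PySem.Set.contains, h]

def news : List Int → PySem.Set Int → List (Nat × Int)
  | [], _ => []
  | v :: rest, seen =>
    if v ∈ seen then (news rest (PySem.Set.add seen v)).map (fun p => (p.1 + 1, p.2))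
    else (0, v) :: (news rest (PySem.Set.add seen v)).map (fun p => (p.1 + 1, p.2))

theorem add_of_mem (s : PySem.Set Int) (v : Int) (h : v ∈ s) : PySem.Set.add s v = s := by
  simp [PySem.Set.add, PySem.Set.contains, h]

theorem add_of_not_mem (s : PySem.Set Int) (v : Int) (h : v ∉ s) : PySem.Set.add s v = s ++ [v] := by
  simp [PySem.Set.add, PySem.Set.contains, h]

theorem update_exists_append (r : List Int) : ∀ s : PySem.Set Int, ∃ t, PySem.Set.update s r = s ++ t := by
  induction r with
  | nil => intro s; exact ⟨[], by simp [PySem.Set.update]⟩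
  | cons v rest ih =>
    intro s
    have h1 : PySem.Set.update s (v :: rest) = PySem.Set.update (PySem.Set.add s v) rest := rfl
    obtain ⟨t, ht⟩ := ih (PySem.Set.add s v)
    by_cases hv : v ∈ s
    · exact ⟨t, by rw [h1, ht, add_of_mem s v hv]⟩
    · exact ⟨v :: t, by rw [h1, ht, add_of_not_mem s v hv]; simp⟩

theorem map_snd_news (r : List Int) : ∀ seen : PySem.Set Int,
    (news r seen).map (·.2) = (PySem.Set.update seen r).drop seen.length := by
  induction r with
  | nil => intro seen; simp [news, PySem.Set.update]
  | cons v rest ih =>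
    intro seen
    have h1 : PySem.Set.update seen (v :: rest) = PySem.Set.update (PySem.Set.add seen v) rest := rfl
    by_cases hv : v ∈ seen
    · rw [news, if_pos hv, h1, add_of_mem seen v hv, ← ih seen]
      simp [List.map_map, Function.comp_def]
    · rw [news, if_neg hv, h1, add_of_not_mem seen v hv]
      obtain ⟨t, ht⟩ := update_exists_append rest (seen ++ [v])
      rw [ht]
      have h2 : (news rest (PySem.Set.add seen v)).map (·.2) = t := by
        rw [ih (PySem.Set.add seen v), add_of_not_mem seen v hv, ht]
        simp
      rw [List.map_cons, List.map_map]
      have h3 : seen ++ [v] ++ t = seen ++ (v :: t) := by simp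
      rw [h3, List.drop_left]
      simp only [Function.comp_def] at h2 ⊢
      rw [add_of_not_mem seen v hv] at h2
      rw [h2]

theorem news_fst_lt (r : List Int) : ∀ (seen : PySem.Set Int) (p : Nat × Int), p ∈ news r seen → p.1 < r.length := by
  induction r with
  | nil => intro seen p hp; simp [news] at hp
  | cons v rest ih =>
    intro seen p hp
    rw [news] at hp
    split at hp
    · simp only [List.mem_map] at hp
      obtain ⟨q, hq, rfl⟩ := hp
      have := ih _ q hq; simpa using by omega
    · rcases List.mem_cons.mp hp with rfl | hp
      · simp
      · simp only [List.mem_map] at hp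
        obtain ⟨q, hq, rfl⟩ := hp
        have := ih _ q hq; simpa using by omega

theorem news_pairwise (r : List Int) : ∀ seen : PySem.Set Int,
    (news r seen).Pairwise (fun a b => a.1 < b.1) := by
  induction r with
  | nil => intro seen; simp [news]
  | cons v rest ih =>
    intro seen
    rw [news]
    have hmap : ((news rest (PySem.Set.add seen v)).map (fun p => (p.1 + 1, p.2))).Pairwise
        (fun a b => a.1 < b.1) := by
      rw [List.pairwise_map]
      exact (ih _).imp (by intro a b h; simpa using by omega)
    split
    · exact hmap
    · refine List.Pairwise.cons ?_ hmap
      intro q hq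
      simp only [List.mem_map] at hq
      obtain ⟨p, _, rfl⟩ := hq
      simp

theorem news_first_occ (r : List Int) : ∀ (seen : PySem.Set Int) (p : Nat × Int), p ∈ news r seen →
    ∃ h : p.1 < r.length, r[p.1] = p.2 ∧ p.2 ∉ r.take p.1 ∧ p.2 ∉ seen := by
  induction r with
  | nil => intro seen p hp; simp [news] at hp
  | cons v rest ih =>
    intro seen p hp
    rw [news] at hp
    have hstep : ∀ q ∈ news rest (PySem.Set.add seen v),
        ∃ h : q.1 + 1 < (v :: rest).length, (v :: rest)[q.1 + 1] = q.2 ∧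
          q.2 ∉ (v :: rest).take (q.1 + 1) ∧ q.2 ∉ seen := by
      intro q hq
      obtain ⟨h, h1, h2, h3⟩ := ih _ q hq
      have hvne : q.2 ∉ PySem.Set.add seen v := h3
      have hqv : q.2 ≠ v := by
        intro hh; apply hvne
        by_cases hv : v ∈ seen
        · rw [add_of_mem seen v hv]; rw [hh]; exact hv
        · rw [add_of_not_mem seen v hv]; simp [hh]
      have hqs : q.2 ∉ seen := by
        intro hh; apply hvne
        by_cases hv : v ∈ seen
        · rw [add_of_mem seen v hv]; exact hh
        · rw [add_of_not_mem seen v hv]; simp [hh]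
      refine ⟨by simpa using by omega, by simpa using h1, ?_, hqs⟩
      simp only [List.take_succ_cons, List.mem_cons]
      rintro (hh | hh)
      · exact hqv hh
      · exact h2 hh
    split at hp
    · simp only [List.mem_map] at hp
      obtain ⟨q, hq, rfl⟩ := hp
      exact hstep q hq
    · rcases List.mem_cons.mp hp with rfl | hp
      · rename_i hv
        exact ⟨by simp, by simp, by simp, hv⟩
      · simp only [List.mem_map] at hp
        obtain ⟨q, hq, rfl⟩ := hp
        exact hstep q hq

theorem bCount_of_neg (K : Int) (hK : K < 0) (r : List Int) : ∀ seen : PySem.Set Int,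
    bCount K r seen = r.length := by
  induction r with
  | nil => intro seen; simp [bCount]
  | cons v rest ih =>
    intro seen
    rw [bCount, if_neg (by simp [PySem.Set.len]; omega), ih]
    simp; omega

def pick (o : Option (Nat × Int)) (n : Nat) : Nat :=
  match o with | some p => p.1 + 1 | none => n

theorem bCount_formula (K : Int) (r : List Int) : ∀ seen : PySem.Set Int,
    (PySem.Set.len seen) ≤ K →
    bCount K r seen = if (PySem.Set.len seen) = K then 0 else
      pick (news r seen)[(K - PySem.Set.len seen).toNat - 1]? r.length := by
  induction r with
  | nil =>
    intro seen _
    simp only [bCount, news, List.getElem?_nil, List.length_nil]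
    split <;> simp [pick]
  | cons v rest ih =>
    intro seen hle
    by_cases hK : (PySem.Set.len seen) = K
    · rw [bCount, if_pos hK, if_pos hK]
    · rw [bCount, if_neg hK, if_neg hK, news]
      have hlt : (PySem.Set.len seen) < K := lt_of_le_of_ne hle hK
      by_cases hv : v ∈ seen
      · rw [if_pos hv, add_of_mem seen v hv, ih seen hle, if_neg hK]
        rcases h : (news rest seen)[(K - PySem.Set.len seen).toNat - 1]? with _ | p
        · have h2 : ((news rest seen).map (fun p => (p.1 + 1, p.2)))[(K - PySem.Set.len seen).toNat - 1]? = none := by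
            simp only [List.getElem?_map, h, Option.map_none]
          rw [h2]; simp [pick]; omega
        · have h2 : ((news rest seen).map (fun p => (p.1 + 1, p.2)))[(K - PySem.Set.len seen).toNat - 1]? = some (p.1 + 1, p.2) := by
            simp only [List.getElem?_map, h, Option.map_some]
          rw [h2]; simp [pick]; omega
      · rw [if_neg hv]
        have hlen : PySem.Set.len (PySem.Set.add seen v) = PySem.Set.len seen + 1 := by
          rw [add_of_not_mem seen v hv]; simp [PySem.Set.len]
        by_cases hK1 : (PySem.Set.len seen) + 1 = K
        · -- index 0: the new element v is the K-th distinct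
          have hidx : (K - PySem.Set.len seen).toNat - 1 = 0 := by omega
          rw [hidx]
          rw [ih (PySem.Set.add seen v) (by omega), if_pos (by omega)]
          simp [pick]
        · have hlt1 : (PySem.Set.len seen) + 1 < K := by omega
          have hidx : (K - PySem.Set.len seen).toNat - 1 = ((K - PySem.Set.len (PySem.Set.add seen v)).toNat - 1) + 1 := by
            rw [hlen]; omega
          rw [hidx]
          rw [ih (PySem.Set.add seen v) (by omega), if_neg (by omega)]
          simp only [List.getElem?_cons_succ, List.getElem?_map]
          rcases h : (news rest (PySem.Set.add seen v))[(K - PySem.Set.len (PySem.Set.add seen v)).toNat - 1]? with _ | p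
          · simp [pick]; omega
          · simp [pick]; omega

theorem bLast_getD (l : List Int) : ∀ (j : Nat) (v : Int), (h : j < l.length) → l[j] = v →
    v ∉ l.drop (j + 1) → (bLast l).getD v 0 = (j : Int) := by
  induction l using List.reverseRecOn with
  | nil => intro j v h _ _; simp at h
  | append_singleton t x ih =>
    intro j v h hget hdrop
    have hen : PySem.List.enumerate (t ++ [x]) 0 = PySem.List.enumerate t 0 ++ [((t.length : Int), x)] := by
      rw [PySem.List.enumerate_append]
      simp [PySem.List.enumerate]
    have hd : bLast (t ++ [x]) = (bLast t).insert x (t.length : Int) := by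
      unfold bLast
      rw [hen, List.foldl_append]
      rfl
    rw [hd, PySem.Dict.getD_insert]
    by_cases hvx : v = x
    · rw [if_pos hvx]
      -- v = x: must be the last position
      have hj : j = t.length := by
        by_contra hne
        have hjt : j < t.length := by simp at h; omega
        apply hdrop
        have : x ∈ (t ++ [x]).drop (j + 1) := by
          have : (t ++ [x]).drop (j + 1) = t.drop (j + 1) ++ [x] := by
            rw [List.drop_append_of_le_length (by omega)]
          rw [this]; simp
        rwa [hvx]
      rw [hj]
    · rw [if_neg hvx]
      have hjt : j < t.length := by
        by_contra hge
        have hj : j = t.length := by simp at h; omega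
        apply hvx
        rw [← hget]
        have : (t ++ [x])[j] = x := by
          subst hj; simp
        exact this
      apply ih j v hjt
      · rw [← hget]
        exact List.getElem_append_left' hjt [x]
      · intro hmem
        apply hdrop
        rw [List.drop_append_of_le_length (by omega)]
        simp [hmem]

theorem bLast_keys (l : List Int) : (bLast l).keys = PySem.Set.ofList l := by
  unfold bLast
  rw [PySem.Dict.keys_foldl_insert_key]
  simp [PySem.List.map_snd_enumerate, PySem.Dict.keys_empty]
  rw [show PySem.Set.update ([] : PySem.Set Int) l = PySem.Set.ofList l from (PySem.Set.ofList_eq_foldl l) ▸ rfl]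

theorem bLast_nodup (l : List Int) : (bLast l).keys.Nodup := by
  unfold bLast
  exact PySem.Dict.nodup_keys_foldl_insert_key _ _ _ _ (by simp [PySem.Dict.keys_empty])

theorem bLast_values (l : List Int) :
    (bLast l).values = (PySem.Set.ofList l).map (fun k => (bLast l).getD k 0) := by
  rw [PySem.Dict.values_eq_map_keys _ (bLast_nodup l) 0, bLast_keys]

theorem ofList_reverse_eq_map_snd_news (r : List Int) :
    PySem.Set.ofList r = (news r ([] : PySem.Set Int)).map (·.2) := by
  rw [map_snd_news r ([] : PySem.Set Int)]
  simp [PySem.Set.ofList_eq_foldl, PySem.Set.update]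

theorem reverse_take_eq_drop (l : List Int) (m : Nat) :
    (l.reverse.take m).reverse = l.drop (l.length - m) := by
  rw [List.take_reverse]
  simp

theorem bLast_getD_news (l : List Int) (p : Nat × Int) (hp : p ∈ news l.reverse ([] : PySem.Set Int)) :
    (bLast l).getD p.2 0 = ((l.length - 1 - p.1 : Nat) : Int) := by
  obtain ⟨h, hget, htake, _⟩ := news_first_occ l.reverse ([] : PySem.Set Int) p hp
  have hn : p.1 < l.length := by simpa using h
  apply bLast_getD l (l.length - 1 - p.1) p.2 (by omega)
  · rw [← hget, List.getElem_reverse]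
  · intro hmem
    apply htake
    have hd : l.drop (l.length - 1 - p.1 + 1) = l.drop (l.length - p.1) := by
      congr 1; omega
    rw [hd, ← reverse_take_eq_drop l p.1] at hmem
    simpa using hmem

theorem sorted_bLast_values (l : List Int) :
    PySem.List.sorted (bLast l).values (fun x => x) false
      = ((news l.reverse ([] : PySem.Set Int)).map
          (fun p => ((l.length - 1 - p.1 : Nat) : Int))).reverse := by
  apply PySem.List.sorted_eq_of_perm_of_pairwise_lt
  · -- permutation
    apply List.Perm.trans (List.reverse_perm _)
    have h1 : (news l.reverse ([] : PySem.Set Int)).map (fun p => ((l.length - 1 - p.1 : Nat) : Int))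
        = (PySem.Set.ofList l.reverse).map (fun k => (bLast l).getD k 0) := by
      rw [ofList_reverse_eq_map_snd_news, List.map_map]
      apply List.map_congr_left
      intro p hp
      simp only [Function.comp_apply]
      exact (bLast_getD_news l p hp).symm
    rw [h1, bLast_values]
    apply List.Perm.map
    rw [List.perm_ext_iff_of_nodup (PySem.Set.nodup_ofList _) (PySem.Set.nodup_ofList _)]
    intro a
    simp [PySem.Set.mem_ofList]
  · -- strictly increasing
    rw [List.pairwise_reverse, List.pairwise_map]
    apply ((news_pairwise l.reverse ([] : PySem.Set Int)).imp_of_mem)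
    intro a b ha hb hab
    have hbn : b.1 < l.length := by simpa using news_fst_lt l.reverse _ b hb
    have : l.length - 1 - b.1 < l.length - 1 - a.1 := by omega
    exact_mod_cast this

theorem bLast_size (l : List Int) : (bLast l).size = (news l.reverse ([] : PySem.Set Int)).length := by
  have h1 : (bLast l).size = (bLast l).keys.length := by
    simp [PySem.Dict.size, PySem.Dict.keys]
  rw [h1, bLast_keys]
  have hperm : (PySem.Set.ofList l).Perm (PySem.Set.ofList l.reverse) := by
    rw [List.perm_ext_iff_of_nodup (PySem.Set.nodup_ofList _) (PySem.Set.nodup_ofList _)]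
    intro a; simp [PySem.Set.mem_ofList]
  rw [hperm.length_eq, ofList_reverse_eq_map_snd_news]
  simp

theorem cut_spec (l : List Int) (K : Int) :
    (if K = 0 then (l.length : Int)
     else if 0 < K ∧ K ≤ ((bLast l).size : Int) then
       PySem.List.pyGetD (PySem.List.sorted (bLast l).values (fun x => x) false) (((bLast l).size : Int) - K) 0
     else 0)
    = (l.length : Int) - (bCount K l.reverse ([] : PySem.Set Int) : Int) := by
  have hlen0 : PySem.Set.len ([] : PySem.Set Int) = 0 := by simp [PySem.Set.len]
  have hrevlen : l.reverse.length = l.length := by simp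
  set D := (news l.reverse ([] : PySem.Set Int)).length with hD
  by_cases hK0 : K = 0
  · subst hK0
    rw [if_pos rfl, bCount_formula 0 l.reverse ([] : PySem.Set Int) (by rw [hlen0]),
      if_pos (by rw [hlen0])]
    simp
  · rw [if_neg hK0]
    by_cases hKneg : K < 0
    · rw [if_neg (by rintro ⟨h, _⟩; omega), bCount_of_neg K hKneg l.reverse ([] : PySem.Set Int),
        hrevlen]
      simp
    · have hKpos : 0 < K := by omega
      by_cases hKD : K ≤ (D : Int)
      · rw [if_pos ⟨hKpos, by rw [bLast_size]; exact hKD⟩]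
        rw [bCount_formula K l.reverse ([] : PySem.Set Int) (by rw [hlen0]; omega),
          if_neg (by rw [hlen0]; omega), hlen0]
        have hidx : ((bLast l).size : Int) - K = (((D - K.toNat : Nat)) : Int) := by
          rw [bLast_size]; omega
        rw [hidx, PySem.List.pyGetD_natCast, sorted_bLast_values]
        set M := (news l.reverse ([] : PySem.Set Int)).map
            (fun p => ((l.length - 1 - p.1 : Nat) : Int)) with hM
        have hlenM : M.length = D := by rw [hM, List.length_map]
        have hrl : (D - K.toNat) < M.reverse.length := by simp [hlenM]; omega
        rw [List.getD_eq_getElem?_getD, List.getElem?_eq_getElem hrl]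
        simp only [Option.getD_some, List.getElem_reverse]
        have hidx2 : M.length - 1 - (D - K.toNat) = K.toNat - 1 := by rw [hlenM]; omega
        have hKn : K.toNat - 1 < (news l.reverse ([] : PySem.Set Int)).length := by omega
        rw [show (K - 0).toNat - 1 = K.toNat - 1 by omega,
          List.getElem?_eq_getElem hKn]
        simp only [pick, hM]
        rw [List.getElem_map]
        have hmem : (news l.reverse ([] : PySem.Set Int))[M.length - 1 - (D - K.toNat)]'(by omega)
            ∈ news l.reverse ([] : PySem.Set Int) := List.getElem_mem _
        have hqlt := news_fst_lt l.reverse ([] : PySem.Set Int) _ hmem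
        rw [hrevlen] at hqlt
        have hsame : (news l.reverse ([] : PySem.Set Int))[M.length - 1 - (D - K.toNat)]'(by omega)
            = (news l.reverse ([] : PySem.Set Int))[K.toNat - 1]'hKn := by
          congr 1
        rw [hsame] at hqlt ⊢
        push_cast [hqlt]
        omega
      · rw [if_neg (by rintro ⟨_, h⟩; rw [bLast_size] at h; omega)]
        rw [bCount_formula K l.reverse ([] : PySem.Set Int) (by rw [hlen0]; omega),
          if_neg (by rw [hlen0]; omega), hlen0]
        rw [List.getElem?_eq_none (by omega : (news l.reverse ([] : PySem.Set Int)).length ≤ (K - 0).toNat - 1)]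
        simp only [pick]
        rw [hrevlen]
        simp

theorem ofList_append_singleton (l : List Int) (v : Int) :
    PySem.Set.ofList (l ++ [v]) = PySem.Set.add (PySem.Set.ofList l) v := by
  simp [PySem.Set.ofList_eq_foldl, List.foldl_append]

theorem take_succ_getElem (l : List Int) (i : Nat) (h : i < l.length) :
    l.take (i + 1) = l.take i ++ [l[i]] := by
  rw [List.take_add_one, List.getElem?_eq_getElem h]; rfl

theorem ofList_take_succ (l : List Int) (i : Nat) (h : i < l.length) :
    PySem.Set.ofList (l.take (i + 1)) = PySem.Set.add (PySem.Set.ofList (l.take i)) l[i] := by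
  rw [take_succ_getElem l i h]; exact ofList_append_singleton _ _

-- main synchronisation: A's loop from state i equals the take of B's trailing count
theorem aLoop_eq (fkr fkir : List Int) (K : Int) :
    ∀ (fuel i : Nat), fkr.length - i ≤ fuel → i ≤ fkr.length →
      i + bCount K (fkr.drop i) (PySem.Set.ofList (fkr.take i)) ≤ fkir.length →
      aLoop fkr fkir K (PySem.List.pyRange (i : Int) (fkr.length : Int) 1)
          (fkr.take i) (fkir.take i) (((PySem.Set.ofList (fkr.take i)).length : Int))
        = (fkr.take (i + bCount K (fkr.drop i) (PySem.Set.ofList (fkr.take i))),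
           fkir.take (i + bCount K (fkr.drop i) (PySem.Set.ofList (fkr.take i)))) := by
  intro fuel
  induction fuel with
  | zero =>
    intro i hfuel hle _
    have hi : i = fkr.length := by omega
    subst hi
    rw [PySem.List.pyRange_one_eq_nil (le_refl _)]
    simp [aLoop, bCount]
  | succ fuel ih =>
    intro i hfuel hle hL
    by_cases hi : i < fkr.length
    · have hdrop : fkr.drop i = fkr[i] :: fkr.drop (i + 1) := List.drop_eq_getElem_cons hi
      have hrange : PySem.List.pyRange (i : Int) (fkr.length : Int) 1
          = (i : Int) :: PySem.List.pyRange ((i : Int) + 1) (fkr.length : Int) 1 :=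
        PySem.List.pyRange_one_cons (by exact_mod_cast hi)
      rw [hrange]
      show aLoop fkr fkir K _ _ _ _ = _
      rw [aLoop]
      by_cases hK : ((PySem.Set.ofList (fkr.take i)).length : Int) = K
      · rw [if_pos hK, hdrop]
        simp [bCount, PySem.Set.len, hK]
      · rw [if_neg hK]
        set m' := bCount K (fkr.drop (i + 1)) (PySem.Set.ofList (fkr.take (i + 1))) with hm'
        have hb : bCount K (fkr.drop i) (PySem.Set.ofList (fkr.take i)) = 1 + m' := by
          rw [hdrop, bCount, if_neg (by simpa [PySem.Set.len] using hK),
            ← ofList_take_succ fkr i hi]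
        have hiL : i < fkir.length := by
          have h1 : i + bCount K (fkr.drop i) (PySem.Set.ofList (fkr.take i)) ≤ fkir.length := hL
          omega
        have hv : PySem.List.pyGetD fkr (i : Int) 0 = fkr[i] := by
          simp [PySem.List.pyGetD_natCast, List.getD_eq_getElem?_getD, List.getElem?_eq_getElem hi]
        have hw : PySem.List.pyGetD fkir (i : Int) 0 = fkir[i] := by
          simp [PySem.List.pyGetD_natCast, List.getD_eq_getElem?_getD, List.getElem?_eq_getElem hiL]
        have hcast : (i : Int) + 1 = ((i + 1 : Nat) : Int) := by push_cast; ring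
        have hnext := ih (i + 1) (by omega) (by omega) (by omega)
        have hmem : PySem.List.pyGetD fkr (i : Int) 0 ∈ fkr.take i
            ↔ fkr[i] ∈ PySem.Set.ofList (fkr.take i) := by
          rw [hv, PySem.Set.mem_ofList]
        have hstacks : fkr.take i ++ [PySem.List.pyGetD fkr (i : Int) 0] = fkr.take (i + 1) := by
          rw [hv, ← take_succ_getElem fkr i hi]
        have hstacki : fkir.take i ++ [PySem.List.pyGetD fkir (i : Int) 0] = fkir.take (i + 1) := by
          rw [hw, ← take_succ_getElem fkir i hiL]
        have harith : i + (1 + m') = (i + 1) + m' := by omega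
        by_cases hmem' : fkr[i] ∈ PySem.Set.ofList (fkr.take i)
        · have hnb : ((PySem.Set.ofList (fkr.take i)).length : Int)
              = ((PySem.Set.ofList (fkr.take (i + 1))).length : Int) := by
            rw [ofList_take_succ fkr i hi, length_add, if_pos hmem']
          have hz : ¬ (fkr.take i).length = 0 := by
            intro h0
            rw [List.eq_nil_of_length_eq_zero h0] at hmem'
            simp [PySem.Set.ofList] at hmem'
          have hnotnot : ¬ PySem.List.pyGetD fkr (i : Int) 0 ∉ fkr.take i := by
            rw [not_not]; exact hmem.mpr hmem'
          rw [if_neg hz, if_neg hnotnot, hstacks, hstacki, hcast, hnb, hnext, hb, harith, hm']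
        · have hnb : ((PySem.Set.ofList (fkr.take i)).length : Int) + 1
              = ((PySem.Set.ofList (fkr.take (i + 1))).length : Int) := by
            rw [ofList_take_succ fkr i hi, length_add, if_neg hmem']
            push_cast; ring
          have hnot : PySem.List.pyGetD fkr (i : Int) 0 ∉ fkr.take i :=
            fun h => hmem' (hmem.mp h)
          by_cases hz : (fkr.take i).length = 0
          · rw [if_pos hz, hstacks, hstacki, hcast, hnb, hnext, hb, harith, hm']
          · rw [if_neg hz, if_pos hnot, hstacks, hstacki, hcast, hnb, hnext, hb, harith, hm']
    · have hin : i = fkr.length := by omega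
      subst hin
      rw [PySem.List.pyRange_one_eq_nil (le_refl _)]
      simp [aLoop, bCount]

-- if K lies between |seen| and the distinct count of seen plus the first j elements, the scan stops within j
theorem bCount_le_of_card (K : Int) :
    ∀ (j : Nat) (l : List Int) (seen : PySem.Set Int),
      (seen.length : Int) ≤ K →
      K ≤ (((l.take j).foldl PySem.Set.add seen).length : Int) →
      bCount K l seen ≤ j := by
  intro j
  induction j with
  | zero =>
    intro l seen h1 h2
    simp only [List.take_zero, List.foldl_nil] at h2
    have hK : (seen.length : Int) = K := le_antisymm h1 h2
    cases l with
    | nil => simp [bCount]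
    | cons v rest => simp [bCount, PySem.Set.len, hK]
  | succ j ih =>
    intro l seen h1 h2
    cases l with
    | nil => simp [bCount]
    | cons v rest =>
      rw [bCount]
      split
      · omega
      · rename_i hne
        have hne2 : ((seen.length : Int)) ≠ K := by
          simpa [PySem.Set.len] using hne
        have h3 : ((PySem.Set.add seen v).length : Int) ≤ K := by
          rw [length_add]; split <;> push_cast <;> omega
        have h4 : K ≤ (((rest.take j).foldl PySem.Set.add (PySem.Set.add seen v)).length : Int) := by
          simpa [List.take_succ_cons] using h2
        have := ih rest (PySem.Set.add seen v) h3 h4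
        omega

theorem pre_bound (first_k first_k_index : List Int) (K : Int)
    (h : Pre_get_min_first_k first_k first_k_index K) :
    bCount K first_k.reverse ([] : PySem.Set Int) ≤ first_k_index.length := by
  rcases h with h | ⟨h0, hc⟩
  · have := bCount_le_length K first_k.reverse ([] : PySem.Set Int)
    simpa using le_trans this (by simpa using h)
  · exact bCount_le_of_card K first_k_index.length first_k.reverse ([] : PySem.Set Int)
      (by simpa [PySem.Set.empty] using h0)
      (by simpa [PySem.Set.ofList_eq_foldl, PySem.Set.empty] using hc)

-- ===== VERDICT (by name: the statement is the Claim_ definition above) =====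
theorem get_min_first_k_spec : Claim_equal_get_min_first_k := by
  intro first_k first_k_index K _ hpre
  unfold Spec_get_min_first_k get_min_first_k get_min_first_k_alt
  simp only [PySem.List.slice?_none_none_neg_one, Option.getD_some]
  have hb := pre_bound first_k first_k_index K hpre
  have h0 := aLoop_eq first_k.reverse first_k_index.reverse K first_k.reverse.length 0
    (by omega) (by omega)
    (by simpa [PySem.Set.ofList, PySem.Set.empty] using hb)
  simp only [List.take_zero, List.drop_zero] at h0
  have hnb0 : ((PySem.Set.ofList ([] : List Int)).length : Int) = 0 := rfl
  have he : PySem.Set.ofList ([] : List Int) = ([] : PySem.Set Int) := rfl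
  rw [hnb0, he] at h0
  simp only [Nat.cast_zero, Nat.zero_add] at h0
  rw [h0]
  set m := bCount K first_k.reverse ([] : PySem.Set Int) with hm
  have hmn : m ≤ first_k.length := by
    have := bCount_le_length K first_k.reverse ([] : PySem.Set Int)
    simpa using this
  rw [cut_spec first_k K]
  rw [← hm]
  have h1 : (first_k_index.length : Int) - ((first_k.length : Int) - ((first_k.length : Int) - (m : Int)))
      = (first_k_index.length : Int) - (m : Int) := by ring
  rw [h1]
  rw [PySem.List.slice_from first_k (by omega : (0:Int) ≤ (first_k.length : Int) - (m : Int))]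
  rw [PySem.List.slice_from first_k_index (by omega : (0:Int) ≤ (first_k_index.length : Int) - (m : Int))]
  have h2 : ((first_k.length : Int) - (m : Int)).toNat = first_k.length - m := by omega
  have h3 : ((first_k_index.length : Int) - (m : Int)).toNat = first_k_index.length - m := by omega
  rw [h2, h3, ← reverse_take_eq_drop first_k m, ← reverse_take_eq_drop first_k_index m]
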